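-- pv_equiv track=rewrite | github.com/miliar/Code_Jam_Webscraper | solutions_python/Problem_181/736.py | solve
-- ===== SOURCE A (Python) =====
-- def solve(s):
--     words = list(s)
--     rst = []
--     last = ""
--
--     for w in words:
--         if w >= last:
--             last = w
--             rst.insert(0, w)
--         else:
--             rst.append(w)
--     return rst
-- ===== SOURCE B (Python) =====
-- def solve(s):
--     chars = list(s)
--     if not chars:
--         return []
--     # Pass 1: running maxima (prefix max including the current char).
--     maxes = []
--     m = chars[0]
--     for c in chars:
--         if c > m:
--             m = c
--         maxes.append(m)
--     # Pass 2/3: a char is a "record" exactly when it equals its prefix max.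
--     records = [c for c, mm in zip(chars, maxes) if c == mm]
--     others = [c for c, mm in zip(chars, maxes) if c != mm]
--     return records[::-1] + others
-- ===== Notes on version B (the rewrite author's own statement) =====
-- stated objective: faster
-- what changed: Replaces A's stateful single pass with insert(0) (quadratic) by a staged algorithm: precompute the prefix-maximum array, then partition characters by the stateless test c == prefix_max[i], and return reversed records plus the rest in one O(n) concatenation.
import Mathlib
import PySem

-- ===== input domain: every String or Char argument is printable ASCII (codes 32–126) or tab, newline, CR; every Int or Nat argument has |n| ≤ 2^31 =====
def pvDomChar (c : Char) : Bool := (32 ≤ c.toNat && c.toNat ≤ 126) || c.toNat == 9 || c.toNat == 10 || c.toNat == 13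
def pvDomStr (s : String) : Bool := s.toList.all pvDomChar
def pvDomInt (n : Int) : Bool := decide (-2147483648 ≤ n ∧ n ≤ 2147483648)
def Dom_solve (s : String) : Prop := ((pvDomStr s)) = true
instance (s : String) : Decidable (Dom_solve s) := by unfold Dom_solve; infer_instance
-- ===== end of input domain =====

-- B drops A's stateful insert(0) loop for staged passes: prefix-max array, partition by c == prefix_max, reverse+concat (objective: faster).

-- Python string `<=` on lists of chars, ported by hand (exact: lexicographic by code point, same as Python on any strings)
def pyStrLe : List Char → List Char → Bool
  | [], _ => true
  | _ :: _, [] => false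
  | a :: as, b :: bs => if a < b then true else if a = b then pyStrLe as bs else false

-- ===== PORT A =====
-- A's loop: state (rst, last); `w >= last` = pyStrLe last [w]; insert(0,w) prepends, else append
def solveLoop : List Char → List String → List Char → List String
  | [], rst, _ => rst
  | w :: rest, rst, last =>
      if pyStrLe last [w] then solveLoop rest (String.ofList [w] :: rst) [w]
      else solveLoop rest (rst ++ [String.ofList [w]]) last

def solve (s : String) : List String := solveLoop s.toList [] []

-- ===== PORT B =====
-- pass 1 of B: the running-maximum list (`m` starts at chars[0]; `if c > m: m = c; maxes.append(m)`)
def maxesLoop : List Char → Char → List Char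
  | [], _ => []
  | c :: rest, m =>
      let m' := if m < c then c else m
      m' :: maxesLoop rest m'

def solve_alt (s : String) : List String :=
  match s.toList with
  | [] => []
  | c :: rest =>
      let chars := c :: rest
      let maxes := maxesLoop chars c
      let records := ((chars.zip maxes).filter (fun p => p.1 == p.2)).map (fun p => String.ofList [p.1])
      let others := ((chars.zip maxes).filter (fun p => !(p.1 == p.2))).map (fun p => String.ofList [p.1])
      records.reverse ++ others

-- ===== PRECONDITION & SPEC =====
def Spec_solve (s : String) (out : List String) : Prop := out = solve_alt s
instance (s : String) (out : List String) : Decidable (Spec_solve s out) := by unfold Spec_solve; infer_instance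

-- ===== CLAIM (what is proved, stated in full; the proofs are below) =====
def Claim_equal_solve : Prop := ∀ (s : String), Dom_solve s → Spec_solve s (solve s)

-- ===== LEMMAS AND PROOFS =====
def recs (cs : List Char) (m : Char) : List String :=
  ((cs.zip (maxesLoop cs m)).filter (fun p => p.1 == p.2)).map (fun p => String.ofList [p.1])

def nonrecs (cs : List Char) (m : Char) : List String :=
  ((cs.zip (maxesLoop cs m)).filter (fun p => !(p.1 == p.2))).map (fun p => String.ofList [p.1])

theorem pyStrLe_single (m c : Char) : pyStrLe [m] [c] = (decide (m < c) || decide (m = c)) := by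
  simp only [pyStrLe]; split_ifs <;> simp_all

theorem solveLoop_eq (cs : List Char) :
    ∀ (m : Char) (rst : List String),
      solveLoop cs rst [m] = (recs cs m).reverse ++ rst ++ nonrecs cs m := by
  induction cs with
  | nil => intro m rst; simp [solveLoop, recs, nonrecs, maxesLoop]
  | cons c rest ih =>
      intro m rst
      simp only [solveLoop, pyStrLe_single]
      by_cases hle : m < c ∨ m = c
      · have hm' : (if m < c then c else m) = c := by
          rcases hle with h | h
          · simp [h]
          · subst h; simp
        have hcond : (decide (m < c) || decide (m = c)) = true := by
          rcases hle with h | h <;> simp [h]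
        rw [if_pos hcond]
        have hrecs : recs (c :: rest) m = String.ofList [c] :: recs rest c := by
          simp [recs, maxesLoop, hm']
        have hnon : nonrecs (c :: rest) m = nonrecs rest c := by
          simp [nonrecs, maxesLoop, hm']
        rw [ih c, hrecs, hnon]
        simp
      · have hm' : (if m < c then c else m) = m := by
          rw [if_neg]; intro h; exact hle (Or.inl h)
        have hne : c ≠ m := fun h => hle (Or.inr h.symm)
        have hcond : (decide (m < c) || decide (m = c)) = false := by
          push Not at hle
          simp [hle.1, hle.2]
        rw [if_neg (by simp [hcond])]
        have hrecs : recs (c :: rest) m = recs rest m := by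
          simp [recs, maxesLoop, hm', hne]
        have hnon : nonrecs (c :: rest) m = String.ofList [c] :: nonrecs rest m := by
          simp [nonrecs, maxesLoop, hm', hne]
        rw [ih m, hrecs, hnon]
        simp

-- ===== VERDICT (by name: the statement is the Claim_ definition above) =====
theorem solve_spec : Claim_equal_solve := by
  intro s _
  unfold Spec_solve solve solve_alt
  cases h : s.toList with
  | nil => simp [solveLoop]
  | cons c rest =>
      simp only [solveLoop, pyStrLe]
      have hm : maxesLoop (c :: rest) c = c :: maxesLoop rest c := by
        simp [maxesLoop]
      rw [solveLoop_eq rest c [String.ofList [c]], hm]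
      simp [recs, nonrecs]
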